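-- pv_equiv track=rewrite | github.com/jessiepuls/cog | src/cog/ui/widgets/filter_query.py | _complete_state
-- ===== SOURCE A (Python) =====
-- def _last_unquoted(text: str, char: str) -> int:
--     """Return index of last occurrence of char outside double quotes, or -1."""
--     in_q = False
--     last = -1
--     for i, c in enumerate(text):
--         if c == '"':
--             in_q = not in_q
--         elif c == char and not in_q:
--             last = i
--     return last
--
-- def _complete_state(key: str, value_part: str) -> str | None:
--     _STATE_CANDIDATES = ["open", "closed", "all"]
--     last_comma = _last_unquoted(value_part, ",")
--     if last_comma >= 0:
--         before_comma = value_part[: last_comma + 1]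
--         partial = value_part[last_comma + 1 :]
--     else:
--         before_comma = ""
--         partial = value_part
--     partial_lower = partial.lower()
--     match = next(
--         (s for s in _STATE_CANDIDATES if s.startswith(partial_lower) and s != partial_lower),
--         None,
--     )
--     if match is None:
--         return None
--     return f"{key}:{before_comma}{match}"
-- ===== SOURCE B (Python) =====
-- def _complete_state(key: str, value_part: str) -> str | None:
--     # Scan from the right, with quote parity recovered from the total quote
--     # count, stopping at the first (i.e. last) unquoted comma.
--     _STATE_CANDIDATES = ("open", "closed", "all")
--     total_q = value_part.count('"')
--     qr = 0
--     last = -1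
--     for i in range(len(value_part) - 1, -1, -1):
--         c = value_part[i]
--         if c == '"':
--             qr += 1
--         elif c == ',' and (total_q - qr) % 2 == 0:
--             last = i
--             break
--     before = value_part[: last + 1]
--     partial = value_part[last + 1 :].lower()
--     for s in _STATE_CANDIDATES:
--         if s.startswith(partial) and s != partial:
--             return f"{key}:{before}{s}"
--     return None
-- ===== Notes on version B (the rewrite author's own statement) =====
-- stated objective: alternative
-- what changed: The last-unquoted-comma search is rewritten from A's forward char-by-char scan that toggles an in-quote flag and remembers the last hit into a backward scan that derives quote parity from the total quote count and early-exits at the first unquoted comma from the right; the candidate match becomes an early-return loop instead of next() over a generator.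
import Mathlib
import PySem

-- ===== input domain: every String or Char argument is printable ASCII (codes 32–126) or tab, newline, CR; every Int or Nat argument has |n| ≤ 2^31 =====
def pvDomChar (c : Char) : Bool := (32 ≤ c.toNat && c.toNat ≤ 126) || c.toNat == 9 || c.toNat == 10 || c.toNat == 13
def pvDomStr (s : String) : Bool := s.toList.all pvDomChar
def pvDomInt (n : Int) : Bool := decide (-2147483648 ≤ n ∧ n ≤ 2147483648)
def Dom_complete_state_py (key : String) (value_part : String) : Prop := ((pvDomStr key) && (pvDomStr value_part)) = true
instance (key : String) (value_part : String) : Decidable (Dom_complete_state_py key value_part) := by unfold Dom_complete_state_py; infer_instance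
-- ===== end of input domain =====

-- B replaces A's forward char-by-char quote-toggle scan by a backward scan that
-- recovers quote parity from the total quote count and stops at the first
-- (i.e. last) unquoted comma; objective: alternative (same O(n) cost, early exit).

-- ===== PORT A =====
-- for i, c in enumerate(text): toggle in_q on '"', record i on unquoted char match
def lastUnquotedGo (char : String) : List Char → Nat → Bool → Int → Int
  | [], _, _, last => last
  | c :: cs, i, in_q, last =>
    if c = '"' then lastUnquotedGo char cs (i + 1) (!in_q) last
    else if String.ofList [c] = char ∧ in_q = false then lastUnquotedGo char cs (i + 1) in_q (i : Int)
    else lastUnquotedGo char cs (i + 1) in_q last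

def last_unquoted (text : String) (char : String) : Int :=
  lastUnquotedGo char text.toList 0 false (-1)

def complete_state_py (key : String) (value_part : String) : Option String :=
  let candidates : List String := ["open", "closed", "all"]
  let last_comma := last_unquoted value_part ","
  let before_comma : String :=
    if last_comma ≥ 0 then PySem.Str.slice value_part none (some (last_comma + 1)) else ""
  let part : String :=
    if last_comma ≥ 0 then PySem.Str.slice value_part (some (last_comma + 1)) none else value_part
  let partial_lower := PySem.Str.lower part
  -- match = next(..., None); if match is None: return None; return f"{key}:{before_comma}{match}"
  (candidates.find? (fun s => PySem.Str.startswith s partial_lower && s != partial_lower)).map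
    (fun m => key ++ ":" ++ before_comma ++ m)

-- ===== PORT B =====
-- for i in range(len-1, -1, -1): walk the reversed character list carrying the
-- current index i and the count qr of quotes already seen on the right; break = return i
def scanBackGo (total : Int) : List Char → Int → Int → Int
  | [], _, _ => -1
  | c :: rest, i, qr =>
    if c = '"' then scanBackGo total rest (i - 1) (qr + 1)
    else if c = ',' ∧ PySem.Int.mod (total - qr) 2 = 0 then i
    else scanBackGo total rest (i - 1) qr

-- for s in _STATE_CANDIDATES: early return of the completed string
def tryCands (key before part : String) : List String → Option String
  | [] => none
  | s :: rest =>
    if PySem.Str.startswith s part && s != part then some (key ++ ":" ++ before ++ s)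
    else tryCands key before part rest

def complete_state_py_alt (key : String) (value_part : String) : Option String :=
  let cs := value_part.toList
  let total_q : Int := (cs.count '"' : Nat)   -- value_part.count('"')
  let last := scanBackGo total_q cs.reverse ((cs.length : Int) - 1) 0
  let before := PySem.Str.slice value_part none (some (last + 1))
  let part := PySem.Str.lower (PySem.Str.slice value_part (some (last + 1)) none)
  tryCands key before part ["open", "closed", "all"]

-- ===== PRECONDITION & SPEC =====
def Spec_complete_state_py (key : String) (value_part : String) (out : Option String) : Prop := out = complete_state_py_alt key value_part
instance (key : String) (value_part : String) (out : Option String) : Decidable (Spec_complete_state_py key value_part out) := by unfold Spec_complete_state_py; infer_instance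

-- ===== CLAIM (what is proved, stated in full; the proofs are below) =====
def Claim_equal_complete_state_py : Prop := ∀ (key : String) (value_part : String), Dom_complete_state_py key value_part → Spec_complete_state_py key value_part (complete_state_py key value_part)

-- ===== LEMMAS AND PROOFS =====

theorem ofList_eq_comma (c : Char) : (String.ofList [c] = ",") ↔ c = ',' := by
  constructor
  · intro h; have := congrArg String.toList h; simpa using this
  · intro h; subst h; rfl

-- appending one char on the right of A's scan
theorem goA_append (cs : List Char) (c : Char) (off : Nat) (q : Bool) (last : Int) :
    lastUnquotedGo "," (cs ++ [c]) off q last =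
      if c = '"' then lastUnquotedGo "," cs off q last
      else if c = ',' ∧ q = decide (cs.count '"' % 2 = 1) then ((off : Int) + cs.length)
      else lastUnquotedGo "," cs off q last := by
  induction cs generalizing off q last with
  | nil =>
    by_cases hq : c = '"'
    · subst hq; simp [lastUnquotedGo]
    · by_cases hc : c = ','
      · subst hc; cases q <;> simp [lastUnquotedGo, hq]
      · simp [lastUnquotedGo, hq, hc, ofList_eq_comma]
  | cons d ds ih =>
    rw [List.cons_append]
    by_cases hd : d = '"'
    · subst hd
      have hL : lastUnquotedGo "," ('"' :: (ds ++ [c])) off q last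
          = lastUnquotedGo "," (ds ++ [c]) (off + 1) (!q) last := by
        simp [lastUnquotedGo]
      have hR : lastUnquotedGo "," ('"' :: ds) off q last
          = lastUnquotedGo "," ds (off + 1) (!q) last := by
        simp [lastUnquotedGo]
      rw [hL, ih, hR]
      by_cases hcq : c = '"'
      · simp [hcq]
      · rw [if_neg hcq, if_neg hcq]
        have hcnt : ('"' :: ds).count '"' = ds.count '"' + 1 := by
          simp
        by_cases hc : c = ','
        · have hiff : ((!q) = decide (ds.count '"' % 2 = 1))
              ↔ (q = decide (('"' :: ds).count '"' % 2 = 1)) := by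
            rw [hcnt]
            rcases Nat.mod_two_eq_zero_or_one (ds.count '"') with h | h <;>
              cases q <;> simp [Nat.add_mod, h]
          by_cases hcond : (!q) = decide (ds.count '"' % 2 = 1)
          · rw [if_pos ⟨hc, hcond⟩, if_pos ⟨hc, hiff.mp hcond⟩]
            push_cast [List.length_cons]; ring
          · rw [if_neg (fun h => hcond h.2), if_neg (fun h => hcond (hiff.mpr h.2))]
        · rw [if_neg (fun h => hc h.1), if_neg (fun h => hc h.1)]
    · have hcnt : (d :: ds).count '"' = ds.count '"' := by simp [List.count_cons, hd]
      by_cases hdm : String.ofList [d] = "," ∧ q = false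
      · have hL : lastUnquotedGo "," (d :: (ds ++ [c])) off q last
            = lastUnquotedGo "," (ds ++ [c]) (off + 1) q (off : Int) := by
          simp only [lastUnquotedGo]; rw [if_neg hd, if_pos hdm]
        have hR : lastUnquotedGo "," (d :: ds) off q last
            = lastUnquotedGo "," ds (off + 1) q (off : Int) := by
          simp only [lastUnquotedGo]; rw [if_neg hd, if_pos hdm]
        rw [hL, ih, hR]
        by_cases hcq : c = '"'
        · simp [hcq]
        · rw [if_neg hcq, if_neg hcq, hcnt]
          by_cases hc2 : c = ',' ∧ q = decide (ds.count '"' % 2 = 1)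
          · rw [if_pos hc2, if_pos hc2]; push_cast [List.length_cons]; ring
          · rw [if_neg hc2, if_neg hc2]
      · have hL : lastUnquotedGo "," (d :: (ds ++ [c])) off q last
            = lastUnquotedGo "," (ds ++ [c]) (off + 1) q last := by
          simp only [lastUnquotedGo]; rw [if_neg hd, if_neg hdm]
        have hR : lastUnquotedGo "," (d :: ds) off q last
            = lastUnquotedGo "," ds (off + 1) q last := by
          simp only [lastUnquotedGo]; rw [if_neg hd, if_neg hdm]
        rw [hL, ih, hR]
        by_cases hcq : c = '"'
        · simp [hcq]
        · rw [if_neg hcq, if_neg hcq, hcnt]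
          by_cases hc2 : c = ',' ∧ q = decide (ds.count '"' % 2 = 1)
          · rw [if_pos hc2, if_pos hc2]; push_cast [List.length_cons]; ring
          · rw [if_neg hc2, if_neg hc2]

theorem fmod_natCast_two (n : Nat) : (PySem.Int.mod (n : Int) 2 = 0) ↔ n % 2 = 0 := by
  have : PySem.Int.mod (n : Int) 2 = ((n : Int) % 2) := by
    simp [PySem.Int.mod, Int.fmod_eq_emod]
  rw [this]
  omega

-- B's backward scan over the reversed remainder equals A's forward scan on that prefix
theorem scan_eq (rs : List Char) (qr : Nat) :
    scanBackGo ((qr : Int) + (rs.count '"' : Nat)) rs ((rs.length : Int) - 1) qr =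
      lastUnquotedGo "," rs.reverse 0 false (-1) := by
  induction rs generalizing qr with
  | nil => simp [scanBackGo, lastUnquotedGo]
  | cons c rest ih =>
    have happ : (c :: rest).reverse = rest.reverse ++ [c] := by simp
    rw [happ, goA_append]
    simp only [scanBackGo]
    by_cases hq : c = '"'
    · rw [if_pos hq, if_pos hq]
      have h1 : ((qr : Int) + ((c :: rest).count '"' : Nat)) =
          (((qr + 1 : Nat) : Int) + (rest.count '"' : Nat)) := by
        simp [List.count_cons, hq]; push_cast; ring
      have h2 : ((c :: rest).length : Int) - 1 - 1 = ((rest.length : Int) - 1) := by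
        simp [List.length_cons]; try ring
      have h3 : ((qr : Int) + 1) = ((qr + 1 : Nat) : Int) := by push_cast; ring
      rw [h1, h2, h3, ih]
    · rw [if_neg hq, if_neg hq]
      have hcnt : (c :: rest).count '"' = rest.count '"' := by simp [List.count_cons, hq]
      by_cases hc : c = ','
      · have hmod : (PySem.Int.mod ((qr : Int) + ((c :: rest).count '"' : Nat) - qr) 2 = 0)
            ↔ rest.count '"' % 2 = 0 := by
          have : ((qr : Int) + ((c :: rest).count '"' : Nat) - qr) = ((rest.count '"' : Nat) : Int) := by
            rw [hcnt]; ring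
          rw [this, fmod_natCast_two]
        have hpar : (rest.reverse.count '"') = rest.count '"' := by
          simp
        by_cases hm : rest.count '"' % 2 = 0
        · rw [if_pos ⟨hc, hmod.mpr hm⟩,
            if_pos ⟨hc, by rw [hpar]; simpa using (show ¬ rest.count '"' % 2 = 1 by omega)⟩]
          simp [List.length_cons]; try ring
        · rw [if_neg (by rw [hmod]; tauto),
            if_neg (by rw [hpar]; rintro ⟨-, h⟩; simp at h; omega)]
          have h2 : ((c :: rest).length : Int) - 1 - 1 = ((rest.length : Int) - 1) := by
            simp [List.length_cons]; try ring
          rw [h2, hcnt, ih]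
      · rw [if_neg (fun h => hc h.1), if_neg (fun h => hc h.1)]
        have h2 : ((c :: rest).length : Int) - 1 - 1 = ((rest.length : Int) - 1) := by
          simp [List.length_cons]; try ring
        rw [h2, hcnt, ih]

-- A's scan result is either the initial accumulator or a nonnegative index
theorem goA_range (cs : List Char) (off : Nat) (q : Bool) (last : Int) :
    lastUnquotedGo "," cs off q last = last ∨ 0 ≤ lastUnquotedGo "," cs off q last := by
  induction cs generalizing off q last with
  | nil => left; rfl
  | cons c rest ih =>
    simp only [lastUnquotedGo]
    split_ifs with h1 h2
    · exact ih _ _ _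
    · rcases ih (off + 1) q (off : Int) with h | h
      · right; rw [h]; exact Int.natCast_nonneg off
      · right; exact h
    · exact ih _ _ _

-- A's next(...) over find? equals B's early-return loop
theorem find?_eq_tryCands (key before part : String) (l : List String) :
    (l.find? (fun s => PySem.Str.startswith s part && s != part)).map
      (fun m => key ++ ":" ++ before ++ m) = tryCands key before part l := by
  induction l with
  | nil => rfl
  | cons s rest ih =>
    by_cases h : (PySem.Str.startswith s part && s != part) = true
    · simp only [List.find?_cons, h]
      simp only [tryCands]
      rw [if_pos h]
      rfl
    · have hf : (PySem.Str.startswith s part && s != part) = false := by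
        simpa using h
      simp only [List.find?_cons, hf]
      simp only [tryCands]
      rw [if_neg h]
      exact ih

theorem slice_zero_empty (s : String) : PySem.Str.slice s none (some ((-1 : Int) + 1)) = "" := by
  have h0 : ((-1 : Int) + 1) = ((0 : Nat) : Int) := by norm_num
  rw [h0]
  simp [PySem.Str.slice]
  rfl

theorem slice_zero_full (s : String) : PySem.Str.slice s (some ((-1 : Int) + 1)) none = s := by
  have h0 : ((-1 : Int) + 1) = ((0 : Nat) : Int) := by norm_num
  rw [h0]
  simp [PySem.Str.slice]

-- ===== VERDICT (by name: the statement is the Claim_ definition above) =====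
set_option maxHeartbeats 1000000 in
theorem complete_state_py_spec : Claim_equal_complete_state_py := by
  intro key v _
  unfold Spec_complete_state_py complete_state_py complete_state_py_alt
  have hscan : scanBackGo ((v.toList.count '"' : Nat)) v.toList.reverse
      ((v.toList.length : Int) - 1) 0 =
      last_unquoted v "," := by
    have := scan_eq v.toList.reverse 0
    simpa [last_unquoted, List.count_reverse, List.length_reverse] using this
  simp only [hscan]
  set L := last_unquoted v "," with hL
  rcases goA_range v.toList 0 false (-1) with h | h
  · -- L = -1
    have hL1 : L = -1 := by rw [hL]; unfold last_unquoted; exact h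
    have hn : ¬ (L ≥ 0) := by rw [hL1]; norm_num
    rw [if_neg hn, if_neg hn, hL1]
    rw [slice_zero_empty, slice_zero_full]
    exact find?_eq_tryCands key "" (PySem.Str.lower v) _
  · have h' : L ≥ 0 := by rw [hL]; unfold last_unquoted; exact h
    rw [if_pos h', if_pos h']
    exact find?_eq_tryCands key _ _ _
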